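-- pv_equiv track=rewrite | github.com/Arsto009/bot | commands/start.py | _chunk_media_sequence
-- ===== SOURCE A (Python) =====
-- def _chunk_media_sequence(seq):
--     chunks = []
--     current = []
--     for item in seq:
--         if not current:
--             current = [item]
--             continue
--
--         prev = current[-1]
--         same_group = (
--             prev.get("media_group_id")
--             and item.get("media_group_id")
--             and prev.get("media_group_id") == item.get("media_group_id")
--         )
--
--         if same_group and len(current) < 10:
--             current.append(item)
--         else:
--             chunks.append(current)
--             current = [item]
--
--     if current:
--         chunks.append(current)
--     return chunks
-- ===== SOURCE B (Python) =====
-- def _chunk_media_sequence(seq):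
--     # Phase 1: group consecutive items by truthy media_group_id (falsy ids never merge).
--     runs = []
--     prev_key = object()
--     for item in seq:
--         key = item.get("media_group_id") or object()
--         if key == prev_key:
--             runs[-1].append(item)
--         else:
--             runs.append([item])
--         prev_key = key
--     # Phase 2: slice each run into chunks of at most 10.
--     chunks = []
--     for run in runs:
--         while run:
--             chunks.append(run[:10])
--             run = run[10:]
--     return chunks
-- ===== Notes on version B (the rewrite author's own statement) =====
-- stated objective: alternative
-- what changed: A builds size-capped chunks in one stateful loop; B first groups consecutive items by truthy media_group_id (falsy ids never merge) and then slices each run into chunks of at most 10 in a separate pass.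
import Mathlib
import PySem

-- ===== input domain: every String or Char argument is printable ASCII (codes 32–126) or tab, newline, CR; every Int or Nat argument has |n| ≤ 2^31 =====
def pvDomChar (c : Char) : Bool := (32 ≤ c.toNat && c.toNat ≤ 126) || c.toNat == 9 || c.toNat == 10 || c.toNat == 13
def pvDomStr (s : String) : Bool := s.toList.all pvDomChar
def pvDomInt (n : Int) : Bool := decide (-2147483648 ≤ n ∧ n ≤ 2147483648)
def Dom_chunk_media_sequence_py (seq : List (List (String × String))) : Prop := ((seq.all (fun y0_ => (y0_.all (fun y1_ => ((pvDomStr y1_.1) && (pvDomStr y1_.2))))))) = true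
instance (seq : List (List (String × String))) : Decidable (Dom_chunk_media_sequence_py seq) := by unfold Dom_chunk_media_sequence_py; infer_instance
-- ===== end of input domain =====

-- B regroups the work in two passes (group consecutive items by truthy media_group_id, then slice
-- each run into chunks of at most 10) instead of A's single capped-buffer loop; same result, same cost.

-- ===== PORT A =====
-- item.get("media_group_id") on a str->str dict
def pvGetId (it : List (String × String)) : Option String := PySem.Dict.get? (PySem.Dict.mk it) "media_group_id"

-- Python truthiness of an Optional[str] (None and "" are falsy)
def pvTruthy : Option String → Bool
  | none => false
  | some s => s ≠ ""

-- truthiness of A's `prev.get(...) and item.get(...) and prev.get(...) == item.get(...)`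
def pvSameGroup (prev item : List (String × String)) : Bool :=
  pvTruthy (pvGetId prev) && pvTruthy (pvGetId item) && (pvGetId prev == pvGetId item)

-- one iteration of A's for-loop over state (chunks, current)
def pvAStep (st : List (List (List (String × String))) × List (List (String × String)))
    (item : List (String × String)) :
    List (List (List (String × String))) × List (List (String × String)) :=
  if st.2.isEmpty then (st.1, [item])
  else
    -- current[-1]; `current` is nonempty on this branch, so getLast! is exact
    if pvSameGroup st.2.getLast! item && st.2.length < 10 then (st.1, st.2 ++ [item])
    else (st.1 ++ [st.2], [item])

def chunk_media_sequence_py (seq : List (List (String × String))) : List (List (List (String × String))) :=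
  let st := seq.foldl pvAStep ([], [])
  if st.2.isEmpty then st.1 else st.1 ++ [st.2]

-- ===== PORT B =====
-- `item.get("media_group_id") or object()`: a truthy id is `some id`; a falsy id becomes a fresh
-- sentinel object, which compares equal to nothing — rendered as `none` with pvJoins below.
def pvKey (it : List (String × String)) : Option String :=
  match pvGetId it with
  | some s => if s = "" then none else some s
  | none => none

-- `key == prev_key` of B: sentinels (`none`) are unequal to everything, including each other
def pvJoins : Option String → Option String → Bool
  | some a, some b => a == b
  | _, _ => false

-- one iteration of B's grouping loop over state (runs, prev_key)
def pvBStep (st : List (List (List (String × String))) × Option String)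
    (item : List (String × String)) :
    List (List (List (String × String))) × Option String :=
  let key := pvKey item
  if pvJoins st.2 key then (st.1.dropLast ++ [st.1.getLast! ++ [item]], key)
  else (st.1 ++ [[item]], key)

-- B's `while run: chunks.append(run[:10]); run = run[10:]`
def pvChunksOf10 (run : List (List (String × String))) : List (List (List (String × String))) :=
  if h : run = [] then []
  else run.take 10 :: pvChunksOf10 (run.drop 10)
termination_by run.length
decreasing_by
  have hp : 0 < run.length := List.length_pos_iff.mpr h
  simp
  omega

def chunk_media_sequence_py_alt (seq : List (List (String × String))) : List (List (List (String × String))) :=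
  ((seq.foldl pvBStep ([], none)).1).flatMap pvChunksOf10

-- ===== PRECONDITION & SPEC =====
def Spec_chunk_media_sequence_py (seq : List (List (String × String))) (out : List (List (List (String × String)))) : Prop := out = chunk_media_sequence_py_alt seq
instance (seq : List (List (String × String))) (out : List (List (List (String × String)))) : Decidable (Spec_chunk_media_sequence_py seq out) := by unfold Spec_chunk_media_sequence_py; infer_instance

-- ===== CLAIM (what is proved, stated in full; the proofs are below) =====
def Claim_equal_chunk_media_sequence_py : Prop := ∀ (seq : List (List (String × String))), Dom_chunk_media_sequence_py seq → Spec_chunk_media_sequence_py seq (chunk_media_sequence_py seq)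

-- ===== LEMMAS AND PROOFS =====
abbrev PvItem : Type := List (String × String)

-- A's loop rewritten as a recursion that carries only the current buffer
def pvGo : List PvItem → List PvItem → List (List PvItem)
  | cur, [] => if cur.isEmpty then [] else [cur]
  | cur, item :: rest =>
    if cur.isEmpty then pvGo [item] rest
    else if pvSameGroup cur.getLast! item && cur.length < 10 then pvGo (cur ++ [item]) rest
    else cur :: pvGo [item] rest

-- chunking a run that starts with a partial chunk `cur`
def pvChunkFrom : List PvItem → List PvItem → List (List PvItem)
  | cur, [] => [cur]
  | cur, y :: ys => if cur.length < 10 then pvChunkFrom (cur ++ [y]) ys else cur :: pvChunkFrom [y] ys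

-- maximal runs of consecutive pvSameGroup items
def pvRuns : List PvItem → List (List PvItem)
  | [] => []
  | [x] => [[x]]
  | x :: y :: xs =>
    match pvRuns (y :: xs) with
    | [] => [[x]]
    | r :: rs => if pvSameGroup x y then (x :: r) :: rs else [x] :: r :: rs

theorem pv_last_concat {α : Type} [Inhabited α] (l : List α) (x : α) : (l ++ [x]).getLast! = x := by
  cases h : l ++ [x] with
  | nil => simp at h
  | cons b t =>
    show (b :: t).getLast _ = x
    have h2 : (b :: t).getLast? = some x := by rw [← h, List.getLast?_concat]
    rw [List.getLast?_eq_some_getLast (by simp)] at h2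
    simpa using h2

theorem pv_last_append {α : Type} [Inhabited α] (a b : List α) (h : b ≠ []) :
    (a ++ b).getLast! = b.getLast! := by
  induction b using List.reverseRecOn with
  | nil => simp at h
  | append_singleton ys y ih => rw [← List.append_assoc, pv_last_concat, pv_last_concat]

-- A's foldl, finished, equals pvGo
theorem pv_foldA (seq : List PvItem) : ∀ (chunks : List (List PvItem)) (cur : List PvItem),
    (if (seq.foldl pvAStep (chunks, cur)).2.isEmpty then (seq.foldl pvAStep (chunks, cur)).1
     else (seq.foldl pvAStep (chunks, cur)).1 ++ [(seq.foldl pvAStep (chunks, cur)).2])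
    = chunks ++ pvGo cur seq := by
  intro chunks cur
  induction seq generalizing chunks cur with
  | nil =>
    simp only [List.foldl_nil, pvGo]
    split <;> simp
  | cons item rest ih =>
    simp only [List.foldl_cons, pvGo, pvAStep]
    by_cases hc : cur.isEmpty
    · simp only [hc, if_pos]
      exact ih chunks [item]
    · simp only [hc, Bool.false_eq_true]
      by_cases hs : (pvSameGroup cur.getLast! item && cur.length < 10) = true
      · simp only [hs, if_true]
        exact ih chunks (cur ++ [item])
      · simp only [hs, if_false, Bool.false_eq_true]
        rw [ih (chunks ++ [cur]) [item]]
        simp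

theorem pv_sameGroup_of_keys (p i : PvItem) (k : String) (hk : k ≠ "")
    (hp : pvGetId p = some k) (hi : pvGetId i = some k) : pvSameGroup p i = true := by
  simp [pvSameGroup, pvTruthy, hp, hi, hk]

theorem pv_splitRun (xs : List PvItem) : ∀ (x : PvItem), ∃ t rest,
    xs = t ++ rest ∧
    pvRuns (x :: xs) = (x :: t) :: pvRuns rest ∧
    (t ≠ [] → ∃ k, k ≠ "" ∧ pvGetId x = some k ∧ ∀ b ∈ t, pvGetId b = some k) ∧
    (∀ z, rest.head? = some z → pvSameGroup ((x :: t).getLast!) z = false) := by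
  induction xs with
  | nil =>
    intro x
    exact ⟨[], [], rfl, by simp [pvRuns], by simp, by simp⟩
  | cons y ys ih =>
    intro x
    obtain ⟨t', rest', hys, hruns, hkey, hbnd⟩ := ih y
    by_cases hsg : pvSameGroup x y = true
    · have hx : ∃ k, k ≠ "" ∧ pvGetId x = some k ∧ pvGetId y = some k := by
        unfold pvSameGroup pvTruthy at hsg
        cases hpx : pvGetId x <;> cases hpy : pvGetId y <;> simp_all
      obtain ⟨k, hk, hkx, hky⟩ := hx
      refine ⟨y :: t', rest', by simpa using hys, ?_, ?_, ?_⟩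
      · have : pvRuns (x :: y :: ys) = (x :: y :: t') :: pvRuns rest' := by
          simp only [pvRuns]
          rw [hruns]
          simp [hsg]
        simpa using this
      · intro _
        refine ⟨k, hk, hkx, ?_⟩
        intro b hb
        rcases List.mem_cons.mp hb with rfl | hb'
        · exact hky
        · by_cases ht' : t' = []
          · subst ht'; simp at hb'
          · obtain ⟨k2, _, hky2, hall⟩ := hkey ht'
            have hkk : k2 = k := by rw [hky] at hky2; exact (Option.some_inj.mp hky2.symm)
            rw [← hkk]
            exact hall b hb'
      · intro z hz
        have hlast : ([x] ++ (y :: t')).getLast! = (y :: t').getLast! :=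
          pv_last_append [x] (y :: t') (by simp)
        simp only [List.cons_append, List.nil_append] at hlast
        rw [hlast]
        exact hbnd z hz
    · refine ⟨[], y :: ys, rfl, ?_, by simp, ?_⟩
      · have : pvRuns (x :: y :: ys) = [x] :: (y :: t') :: pvRuns rest' := by
          simp only [pvRuns]
          rw [hruns]
          simp [hsg]
        rw [this, hruns]
      · intro z hz
        simp only [List.head?_cons, Option.some_inj] at hz
        subst hz
        have : pvSameGroup x y = false := by
          cases hb : pvSameGroup x y
          · rfl
          · exact absurd hb hsg
        simpa using this


theorem pv_chunkFrom_eq (ys : List PvItem) : ∀ (cur : List PvItem), cur ≠ [] → cur.length ≤ 10 →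
    pvChunkFrom cur ys
      = (cur ++ ys.take (10 - cur.length)) :: pvChunksOf10 (ys.drop (10 - cur.length)) := by
  induction ys with
  | nil =>
    intro cur hne _
    simp [pvChunkFrom, pvChunksOf10]
  | cons y ys ih =>
    intro cur hne hlen
    by_cases h : cur.length < 10
    · have h9 : cur.length ≤ 9 := by omega
      have e1 : 10 - (cur.length + 1) = 9 - cur.length := by omega
      have e2 : 10 - cur.length = (9 - cur.length) + 1 := by omega
      simp only [pvChunkFrom, h, if_true]
      rw [ih (cur ++ [y]) (by simp) (by simp; omega)]
      simp only [List.length_append, List.length_cons, List.length_nil, Nat.zero_add, e1, e2,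
        List.take_succ_cons, List.drop_succ_cons]
      simp [List.append_assoc]
    · have h10 : cur.length = 10 := by omega
      simp only [pvChunkFrom, h, if_false]
      rw [ih [y] (by simp) (by simp)]
      have e0 : 10 - cur.length = 0 := by omega
      simp only [e0, List.take_zero, List.drop_zero, List.append_nil]
      rw [show pvChunksOf10 (y :: ys) = (y :: ys).take 10 :: pvChunksOf10 ((y :: ys).drop 10) by
        rw [pvChunksOf10]; simp]
      simp

theorem pv_chunksOf10_cons (x : PvItem) (ys : List PvItem) :
    pvChunksOf10 (x :: ys) = pvChunkFrom [x] ys := by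
  rw [pv_chunkFrom_eq ys [x] (by simp) (by simp)]
  rw [show pvChunksOf10 (x :: ys) = (x :: ys).take 10 :: pvChunksOf10 ((x :: ys).drop 10) by
    rw [pvChunksOf10]; simp]
  simp

theorem pv_last_bang_eq {α : Type} [Inhabited α] (l : List α) :
    l.getLast! = l.getLast?.getD default := by
  cases l with
  | nil => simp [List.getLast!]
  | cons a t =>
    rw [List.getLast?_eq_some_getLast (by simp)]
    rfl

theorem pvGo_nil_cons (z : PvItem) (zs : List PvItem) : pvGo [] (z :: zs) = pvGo [z] zs := rfl

theorem pvGo_step_append (cur : List PvItem) (item : PvItem) (rest : List PvItem)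
    (hne : cur ≠ []) (hsg : pvSameGroup cur.getLast! item = true) (h : cur.length < 10) :
    pvGo cur (item :: rest) = pvGo (cur ++ [item]) rest := by
  rw [pv_last_bang_eq] at hsg
  simp only [pvGo]
  rw [if_neg (by simp [hne]), if_pos (by simp [hsg, h])]

theorem pvGo_step_break (cur : List PvItem) (item : PvItem) (rest : List PvItem)
    (hne : cur ≠ []) (h : (pvSameGroup cur.getLast! item && decide (cur.length < 10)) = false) :
    pvGo cur (item :: rest) = cur :: pvGo [item] rest := by
  rw [pv_last_bang_eq] at h
  simp only [pvGo]
  rw [if_neg (by simp [hne]), if_neg (by simp [h])]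

theorem pv_go_run (run : List PvItem) : ∀ (cur : List PvItem) (rest : List PvItem),
    cur ≠ [] → cur.length ≤ 10 →
    (run ≠ [] → ∃ k, k ≠ "" ∧ pvGetId cur.getLast! = some k ∧ ∀ b ∈ run, pvGetId b = some k) →
    (∀ z, rest.head? = some z → pvSameGroup ((cur ++ run).getLast!) z = false) →
    pvGo cur (run ++ rest) = pvChunkFrom cur run ++ pvGo [] rest := by
  induction run with
  | nil =>
    intro cur rest hne _ _ hbnd
    cases rest with
    | nil => simp [pvGo, pvChunkFrom, List.isEmpty_iff, hne]
    | cons z zs =>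
      have hz : pvSameGroup cur.getLast! z = false := by simpa using hbnd z rfl
      rw [List.nil_append, pvGo_step_break cur z zs hne (by rw [pv_last_bang_eq] at hz; simp [hz]), pvGo_nil_cons]

      simp [pvChunkFrom]
  | cons y run' ih =>
    intro cur rest hne hlen hkeys hbnd
    obtain ⟨k, hk, hlastk, hallk⟩ := hkeys (by simp)
    have hky : pvGetId y = some k := hallk y (by simp)
    have hsg : pvSameGroup cur.getLast! y = true := pv_sameGroup_of_keys _ _ k hk hlastk hky
    by_cases h : cur.length < 10
    · rw [List.cons_append, pvGo_step_append cur y (run' ++ rest) hne hsg h]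
      rw [ih (cur ++ [y]) rest (by simp) (by simp; omega) ?hk ?hb]
      case hk =>
        intro _
        refine ⟨k, hk, ?_, fun b hb => hallk b (by simp [hb])⟩
        rw [pv_last_concat]
        exact hky
      case hb =>
        intro z hz
        have he : cur ++ [y] ++ run' = cur ++ (y :: run') := by simp
        rw [he]
        exact hbnd z hz
      simp only [pvChunkFrom, h, if_true]
    · rw [List.cons_append, pvGo_step_break cur y (run' ++ rest) hne (by simp [h])]
      rw [ih [y] rest (by simp) (by simp) ?hk2 ?hb2]
      case hk2 =>
        intro _
        exact ⟨k, hk, by simpa using hky, fun b hb => hallk b (by simp [hb])⟩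
      case hb2 =>
        intro z hz
        have h1 : ([y] ++ run').getLast! = (y :: run').getLast! := rfl
        have h2 : (cur ++ (y :: run')).getLast! = (y :: run').getLast! :=
          pv_last_append cur (y :: run') (by simp)
        rw [h1, ← h2]
        exact hbnd z hz
      simp [pvChunkFrom, h]

theorem pv_joins_eq (p i : PvItem) : pvJoins (pvKey p) (pvKey i) = pvSameGroup p i := by
  unfold pvKey pvSameGroup pvTruthy
  cases hp : pvGetId p <;> cases hi : pvGetId i <;> simp [pvJoins] <;> split_ifs <;> simp_all

theorem pv_foldB_run (t : List PvItem) : ∀ (runs : List (List PvItem)) (cur : List PvItem)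
    (rest : List PvItem), cur ≠ [] →
    (t ≠ [] → ∃ k, k ≠ "" ∧ pvGetId cur.getLast! = some k ∧ ∀ b ∈ t, pvGetId b = some k) →
    List.foldl pvBStep (runs ++ [cur], pvKey cur.getLast!) (t ++ rest)
      = List.foldl pvBStep (runs ++ [cur ++ t], pvKey ((cur ++ t).getLast!)) rest := by
  induction t with
  | nil =>
    intro runs cur rest _ _
    simp
  | cons y t' ih =>
    intro runs cur rest hne hkeys
    obtain ⟨k, hk, hlastk, hallk⟩ := hkeys (by simp)
    have hky : pvGetId y = some k := hallk y (by simp)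
    have hkeyL : pvKey cur.getLast! = some k := by unfold pvKey; rw [hlastk]; simp [hk]
    have hkeyY : pvKey y = some k := by unfold pvKey; rw [hky]; simp [hk]
    have hstep : pvBStep (runs ++ [cur], pvKey cur.getLast!) y
        = (runs ++ [cur ++ [y]], pvKey y) := by
      simp only [pvBStep, hkeyL, hkeyY]
      rw [if_pos (by simp [pvJoins])]
      rw [List.dropLast_concat, pv_last_concat]
    rw [List.cons_append, List.foldl_cons, hstep,
      show pvKey y = pvKey ((cur ++ [y]).getLast!) by rw [pv_last_concat]]
    rw [ih runs (cur ++ [y]) rest (by simp) ?hk]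
    case hk =>
      intro _
      refine ⟨k, hk, ?_, fun b hb => hallk b (by simp [hb])⟩
      rw [pv_last_concat]
      exact hky
    simp

theorem pv_foldB (n : ℕ) : ∀ (seq : List PvItem), seq.length ≤ n → ∀ (runs : List (List PvItem))
    (pk : Option String), (∀ z, seq.head? = some z → pvJoins pk (pvKey z) = false) →
    (List.foldl pvBStep (runs, pk) seq).1 = runs ++ pvRuns seq := by
  induction n with
  | zero =>
    intro seq hlen runs pk _
    have : seq = [] := List.length_eq_zero_iff.mp (Nat.le_zero.mp hlen)
    subst this
    simp [pvRuns]
  | succ n ih =>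
    intro seq hlen runs pk hhead
    cases seq with
    | nil => simp [pvRuns]
    | cons x xs =>
      obtain ⟨t, rest, hxs, hruns, hkey, hbnd⟩ := pv_splitRun xs x
      subst hxs
      have hstep : pvBStep (runs, pk) x = (runs ++ [[x]], pvKey x) := by
        simp only [pvBStep]
        rw [if_neg (by simp [hhead x rfl])]
      rw [List.foldl_cons, hstep,
        show pvKey x = pvKey ([x].getLast!) from rfl]
      rw [pv_foldB_run t runs [x] rest (by simp) ?hk]
      case hk =>
        intro ht
        obtain ⟨k, hk, hkx, hall⟩ := hkey ht
        exact ⟨k, hk, by simpa using hkx, hall⟩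
      have hrest : rest.length ≤ n := by
        simp at hlen
        omega
      rw [ih rest hrest (runs ++ [[x] ++ t]) (pvKey (([x] ++ t).getLast!)) ?hh]
      case hh =>
        intro z hz
        rw [pv_joins_eq]
        exact hbnd z (by simpa using hz)
      rw [hruns]
      simp

theorem pv_goMain (n : ℕ) : ∀ (seq : List PvItem), seq.length ≤ n →
    pvGo [] seq = (pvRuns seq).flatMap pvChunksOf10 := by
  induction n with
  | zero =>
    intro seq hlen
    have : seq = [] := List.length_eq_zero_iff.mp (Nat.le_zero.mp hlen)
    subst this
    simp [pvGo, pvRuns]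
  | succ n ih =>
    intro seq hlen
    cases seq with
    | nil => simp [pvGo, pvRuns]
    | cons x xs =>
      obtain ⟨t, rest, hxs, hruns, hkey, hbnd⟩ := pv_splitRun xs x
      subst hxs
      rw [pvGo_nil_cons x (t ++ rest)]
      rw [pv_go_run t [x] rest (by simp) (by simp) ?hk ?hb]
      case hk =>
        intro ht
        obtain ⟨k, hk, hkx, hall⟩ := hkey ht
        exact ⟨k, hk, by simpa using hkx, hall⟩
      case hb =>
        intro z hz
        exact hbnd z hz
      have hrest : rest.length ≤ n := by
        simp at hlen
        omega
      rw [ih rest hrest, ← pv_chunksOf10_cons, hruns]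
      simp

-- ===== VERDICT (by name: the statement is the Claim_ definition above) =====
theorem chunk_media_sequence_py_spec : Claim_equal_chunk_media_sequence_py := by
  intro seq _
  unfold Spec_chunk_media_sequence_py chunk_media_sequence_py chunk_media_sequence_py_alt
  have hA := pv_foldA seq [] []
  simp only [List.nil_append] at hA
  have hB := pv_foldB seq.length seq le_rfl [] none (by intro z _; cases hk : pvKey z <;> rfl)
  simp only [List.nil_append] at hB
  rw [hA, hB, pv_goMain seq.length seq le_rfl]
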